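-- pv_equiv track=rewrite | github.com/AnjanayKhare/Multicast-and-Broadcat-Using-TCP-IP | client.py | pseudoRand
-- ===== SOURCE A (Python) =====
-- def pseudoRand(seed):
--     temp = int(seed)
--     ans = int(seed)
--     x = (2<<31)-1
--     while temp:
--         if temp&1:
--             ans = ((ans+1)^x)%x
--         temp>>=1
--     return ans
-- ===== SOURCE B (Python) =====
-- def pseudoRand(seed):
--     # The update a -> ((a+1)^x)%x with x = 2**32-1 is the involution a -> x-1-a
--     # on [0, x-1], so the result depends only on the PARITY of popcount(seed):
--     # compute that parity by XOR-folding the 32-bit word, then apply the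
--     # closed form once (or not at all).  O(1), no per-bit transform chain.
--     s = int(seed)
--     x = (2 << 31) - 1
--     t = s ^ (s >> 16)
--     t ^= t >> 8
--     t ^= t >> 4
--     t ^= t >> 2
--     t ^= t >> 1
--     return x - 1 - s if t & 1 else s
-- ===== Notes on version B (the rewrite author's own statement) =====
-- stated objective: alternative
-- what changed: Replaces A's per-set-bit chain of modular-xor updates with a closed form: the update is the involution a -> x-1-a, so B computes only the parity of popcount(seed) by a logarithmic XOR word-fold and applies x-1-seed at most once.
import Mathlib
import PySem

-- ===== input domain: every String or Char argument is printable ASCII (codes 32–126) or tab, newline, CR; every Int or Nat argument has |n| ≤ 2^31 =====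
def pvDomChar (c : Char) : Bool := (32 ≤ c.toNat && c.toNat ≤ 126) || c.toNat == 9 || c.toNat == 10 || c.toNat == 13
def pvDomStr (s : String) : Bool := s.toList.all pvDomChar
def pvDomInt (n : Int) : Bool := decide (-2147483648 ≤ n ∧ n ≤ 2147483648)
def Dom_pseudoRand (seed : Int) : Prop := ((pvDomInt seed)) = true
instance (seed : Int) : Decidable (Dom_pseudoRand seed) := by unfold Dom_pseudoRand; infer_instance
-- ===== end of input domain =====

-- B replaces A's per-set-bit chain of modular-xor updates by a closed form: the
-- update is the involution a ↦ x-1-a, so B XOR-folds the 32-bit word to get the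
-- parity of popcount(seed) and applies x-1-seed at most once (objective: alternative).

-- ===== PORT A =====
-- A's while loop; Python diverges when temp < 0 (right shift never reaches 0), so the
-- recursion stops on temp ≤ 0 — such seeds are excluded by Pre_pseudoRand.
def pseudoRandLoop (temp ans x : Int) : Int :=
  if h : temp ≤ 0 then ans
  else
    pseudoRandLoop (temp >>> (1:Nat))
      (if PySem.Int.band temp 1 ≠ 0 then PySem.Int.mod (PySem.Int.bxor (ans + 1) x) x else ans) x
termination_by temp.toNat
decreasing_by
  have : temp >>> (1:Nat) = temp / 2 := by
    rw [Int.shiftRight_eq_div_pow]; norm_num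
  omega

def pseudoRand (seed : Int) : Int :=
  pseudoRandLoop seed seed (((2:Int) <<< (31:Nat)) - 1)

-- ===== PORT B =====
def pseudoRand_alt (seed : Int) : Int :=
  let s := seed
  let x : Int := ((2:Int) <<< (31:Nat)) - 1
  let t1 := PySem.Int.bxor s (s >>> (16:Nat))
  let t2 := PySem.Int.bxor t1 (t1 >>> (8:Nat))
  let t3 := PySem.Int.bxor t2 (t2 >>> (4:Nat))
  let t4 := PySem.Int.bxor t3 (t3 >>> (2:Nat))
  let t5 := PySem.Int.bxor t4 (t4 >>> (1:Nat))
  if PySem.Int.band t5 1 ≠ 0 then x - 1 - s else s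

-- ===== PRECONDITION & SPEC =====
-- Pre_ excludes negative seeds: there A's 'while temp' never terminates (Python hangs), so A returns no value.
def Pre_pseudoRand (seed : Int) : Prop := 0 ≤ seed
instance (seed : Int) : Decidable (Pre_pseudoRand seed) := by unfold Pre_pseudoRand; infer_instance
def pvWitness_pseudoRand : Int := (12345)

def Spec_pseudoRand (seed : Int) (out : Int) : Prop := out = pseudoRand_alt seed
instance (seed : Int) (out : Int) : Decidable (Spec_pseudoRand seed out) := by unfold Spec_pseudoRand; infer_instance

-- ===== CLAIM (what is proved, stated in full; the proofs are below) =====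
def Claim_equal_pseudoRand : Prop := ∀ (seed : Int), Dom_pseudoRand seed → Pre_pseudoRand seed → Spec_pseudoRand seed (pseudoRand seed)

-- ===== LEMMAS AND PROOFS =====

-- parity of popcount, by halving
def pvPar (n : Nat) : Bool :=
  if h : n = 0 then false else decide (n % 2 = 1) ^^ pvPar (n / 2)
termination_by n
decreasing_by omega

-- parity of the bit window [s, s+k)
def pvW : Nat → Nat → Nat → Bool
  | _, 0, _ => false
  | s, k+1, t => t.testBit s ^^ pvW (s+1) k t

theorem pvW_zero (s k : Nat) : pvW s k 0 = false := by
  induction k generalizing s with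
  | zero => rfl
  | succ k ih => simp [pvW, ih]

theorem pvW_add (m : Nat) : ∀ (s n t : Nat), pvW s (m + n) t = (pvW s m t ^^ pvW (s + m) n t) := by
  induction m with
  | zero => intro s n t; simp [pvW]
  | succ m ih =>
      intro s n t
      have h1 : m + 1 + n = (m + n) + 1 := by omega
      have h2 : s + (m + 1) = s + 1 + m := by omega
      rw [h1, h2]
      simp only [pvW, ih (s+1) n t]
      rw [Bool.xor_assoc]

theorem pvW_xor : ∀ (k s a b : Nat), pvW s k (a ^^^ b) = (pvW s k a ^^ pvW s k b) := by
  intro k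
  induction k with
  | zero => intro s a b; rfl
  | succ k ih =>
      intro s a b
      simp only [pvW, Nat.testBit_xor, ih]
      cases a.testBit s <;> cases b.testBit s <;>
        cases pvW (s+1) k a <;> cases pvW (s+1) k b <;> rfl

theorem pvW_shift : ∀ (k s m t : Nat), pvW s k (t >>> m) = pvW (s + m) k t := by
  intro k
  induction k with
  | zero => intro s m t; rfl
  | succ k ih =>
      intro s m t
      simp only [pvW, Nat.testBit_shiftRight, ih]
      have h1 : m + s = s + m := by omega
      have h2 : s + 1 + m = s + m + 1 := by omega
      rw [h1, h2]

theorem pvFold (k t : Nat) : pvW 0 k (t ^^^ (t >>> k)) = pvW 0 (k + k) t := by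
  rw [pvW_xor, pvW_shift, pvW_add k 0 k t, Nat.zero_add]

theorem pvPar_eq_W : ∀ (k t : Nat), t < 2 ^ k → pvPar t = pvW 0 k t := by
  intro k
  induction k with
  | zero =>
      intro t ht
      have : t = 0 := by omega
      subst this; simp [pvPar, pvW]
  | succ k ih =>
      intro t ht
      by_cases h0 : t = 0
      · subst h0; rw [pvW_zero]; simp [pvPar]
      · rw [pvPar, dif_neg h0]
        have ht2 : t / 2 < 2 ^ k := by
          have : 2 ^ (k+1) = 2 * 2 ^ k := by ring
          omega
        rw [ih (t / 2) ht2]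
        have hsh : pvW 0 k (t / 2) = pvW 1 k t := by
          rw [← Nat.shiftRight_one, pvW_shift]
        simp only [pvW, Nat.testBit_zero, hsh]

-- bitwise complement within 32 bits, via BitVec
theorem pvXorOnes (n : Nat) (h : n < 4294967296) : n ^^^ 4294967295 = 4294967295 - n := by
  have h1 : ((BitVec.ofNat 32 n) ^^^ BitVec.allOnes 32).toNat = n ^^^ 4294967295 := by
    simp [BitVec.toNat_xor, BitVec.toNat_ofNat, Nat.mod_eq_of_lt h]
  rw [← h1, BitVec.xor_allOnes, BitVec.toNat_not]
  simp [BitVec.toNat_ofNat, Nat.mod_eq_of_lt h]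

-- one step of A's update is the involution a ↦ 4294967294 - a on [0, 4294967294]
theorem pvStepEq (a : Int) (h0 : 0 ≤ a) (h1 : a ≤ 4294967294) :
    PySem.Int.mod (PySem.Int.bxor (a + 1) 4294967295) 4294967295 = 4294967294 - a := by
  rw [PySem.Int.bxor_of_nonneg (by omega) (by norm_num)]
  have hx : ((4294967295:Int)).toNat = 4294967295 := by rfl
  rw [hx, pvXorOnes (a+1).toNat (by omega)]
  rw [PySem.Int.mod_eq_emod_of_pos (by norm_num)]
  rw [Int.emod_eq_of_lt (by omega) (by omega)]
  omega

theorem pvLoop_eq (n : Nat) : ∀ (temp ans : Int), temp.toNat = n → 0 ≤ temp →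
    0 ≤ ans → ans ≤ 4294967294 →
    pseudoRandLoop temp ans 4294967295 =
      if pvPar temp.toNat then 4294967294 - ans else ans := by
  induction n using Nat.strong_induction_on with
  | _ n ih =>
    intro temp ans hn hnn ha0 ha1
    rw [pseudoRandLoop]
    by_cases h : temp ≤ 0
    · have : temp = 0 := le_antisymm h hnn
      subst this
      simp [pvPar]
    · have htpos : 0 < temp := lt_of_not_ge h
      have hdiv : (temp >>> (1:Nat)) = temp / 2 := by
        rw [Int.shiftRight_eq_div_pow]; norm_num
      have hto : (temp >>> (1:Nat)).toNat = temp.toNat / 2 := by rw [hdiv]; omega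
      have hlt : (temp >>> (1:Nat)).toNat < n := by omega
      have hnn2 : 0 ≤ temp >>> (1:Nat) := by rw [hdiv]; omega
      have hband : PySem.Int.band temp 1 = PySem.Int.mod temp 2 := PySem.Int.band_one temp
      have hmod : PySem.Int.mod temp 2 = (temp.toNat % 2 : Nat) := by
        rw [PySem.Int.mod_eq_emod_of_pos (by norm_num)]; omega
      have hn0 : ¬ temp.toNat = 0 := by omega
      rw [dif_neg h]
      conv_rhs => rw [pvPar, dif_neg hn0]
      by_cases hb : temp.toNat % 2 = 1
      · rw [if_pos (by rw [hband, hmod, hb]; simp)]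
        rw [pvStepEq ans ha0 ha1]
        rw [ih _ hlt _ _ rfl hnn2 (by omega) (by omega), hto]
        rw [hb]
        cases hP : pvPar (temp.toNat / 2) <;> simp
      · have hb0 : temp.toNat % 2 = 0 := by omega
        rw [if_neg (by rw [hband, hmod, hb0]; simp)]
        rw [ih _ hlt _ _ rfl hnn2 ha0 ha1, hto, hb0]
        cases hP : pvPar (temp.toNat / 2) <;> simp

-- B's XOR-fold condition computes pvPar, for 0 ≤ s < 2^32
theorem pvFoldCond (s : Int) (h0 : 0 ≤ s) (h1 : s < 4294967296) :
    (PySem.Int.band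
      (let t1 := PySem.Int.bxor s (s >>> (16:Nat))
       let t2 := PySem.Int.bxor t1 (t1 >>> (8:Nat))
       let t3 := PySem.Int.bxor t2 (t2 >>> (4:Nat))
       let t4 := PySem.Int.bxor t3 (t3 >>> (2:Nat))
       PySem.Int.bxor t4 (t4 >>> (1:Nat))) 1 ≠ 0) ↔ pvPar s.toNat = true := by
  obtain ⟨m, rfl⟩ : ∃ m : Nat, s = (m : Nat) := ⟨s.toNat, by omega⟩
  have hcast : ∀ (a : Nat) (k : Nat),
      PySem.Int.bxor (a : Int) ((a : Int) >>> k) = ((a ^^^ (a >>> k) : Nat) : Int) := by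
    intro a k
    have : ((a : Int) >>> k) = ((a >>> k : Nat) : Int) := by simp
    rw [this, PySem.Int.bxor_natCast]
  simp only [hcast]
  rw [show (1:Int) = ((1:Nat):Int) from rfl, PySem.Int.band_natCast]
  have hm : m < 2 ^ 32 := by norm_num; omega
  set u1 := m ^^^ (m >>> 16) with hu1
  set u2 := u1 ^^^ (u1 >>> 8) with hu2
  set u3 := u2 ^^^ (u2 >>> 4) with hu3
  set u4 := u3 ^^^ (u3 >>> 2) with hu4
  set u5 := u4 ^^^ (u4 >>> 1) with hu5
  have hpar : pvPar m = pvW 0 1 u5 := by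
    rw [hu5, pvFold, hu4, pvFold, hu3, pvFold, hu2, pvFold, hu1, pvFold]
    exact pvPar_eq_W 32 m hm
  have hbit : u5 &&& 1 = u5 % 2 := Nat.and_one_is_mod u5
  have htn : ((m : Int)).toNat = m := by omega
  rw [htn, hpar]
  simp only [pvW, Nat.testBit_zero, Bool.xor_false]
  rw [hbit]
  constructor
  · intro hne
    have : u5 % 2 = 1 := by omega
    simp [this]
  · intro hd
    have : u5 % 2 = 1 := by simpa using hd
    simp [this]

-- ===== VERDICT (by name: the statement is the Claim_ definition above) =====
theorem pseudoRand_spec : Claim_equal_pseudoRand := by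
  intro seed hdom hpre
  have hb : seed ≤ 2147483648 := by
    have := of_decide_eq_true hdom
    exact this.2
  unfold Spec_pseudoRand pseudoRand pseudoRand_alt
  have hx : ((2:Int) <<< (31:Nat)) - 1 = 4294967295 := by decide
  simp only [hx]
  rw [pvLoop_eq seed.toNat seed seed rfl hpre hpre (by omega)]
  rcases (pvFoldCond seed hpre (by omega)) with ⟨h1, h2⟩
  by_cases hc : pvPar seed.toNat = true
  · rw [if_pos hc, if_pos (h2 hc)]
    ring
  · rw [if_neg hc, if_neg (fun hne => hc (h1 hne))]
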